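-- pv_equiv track=rewrite | github.com/duzenz/run-length-encoding | RLE.py | _generate_zig_zag_index
-- ===== SOURCE A (Python) =====
-- def _generate_zig_zag_index(x, y):
--     list_x = x[:]
--     list_y = y[:]
--     list_x.insert(0, 0)
--     list_y.insert(0, 0)
--
--     result_list = []
--
--     for i in range(1, len(list_y)):
--         for k in range(1, len(list_x)):
--             result_list.append([sum(list_x[:k]), sum(list_x[:k + 1]), sum(list_y[:i]), sum(list_y[:i + 1])])
--
--     return result_list
-- ===== SOURCE B (Python) =====
-- def _generate_zig_zag_index(x, y):
--     px = [0]
--     for v in x: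
--         px.append(px[-1] + v)
--     py = [0]
--     for v in y:
--         py.append(py[-1] + v)
--     return [[px[k], px[k + 1], py[i], py[i + 1]]
--             for i in range(len(y)) for k in range(len(x))]
-- ===== Notes on version B (the rewrite author's own statement) =====
-- stated objective: faster
-- what changed: B builds the prefix sums of x and y once with a running total and emits each cell in O(1) via flat comprehension, instead of re-summing slices list[:k] inside the doubly nested loop.
import Mathlib
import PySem

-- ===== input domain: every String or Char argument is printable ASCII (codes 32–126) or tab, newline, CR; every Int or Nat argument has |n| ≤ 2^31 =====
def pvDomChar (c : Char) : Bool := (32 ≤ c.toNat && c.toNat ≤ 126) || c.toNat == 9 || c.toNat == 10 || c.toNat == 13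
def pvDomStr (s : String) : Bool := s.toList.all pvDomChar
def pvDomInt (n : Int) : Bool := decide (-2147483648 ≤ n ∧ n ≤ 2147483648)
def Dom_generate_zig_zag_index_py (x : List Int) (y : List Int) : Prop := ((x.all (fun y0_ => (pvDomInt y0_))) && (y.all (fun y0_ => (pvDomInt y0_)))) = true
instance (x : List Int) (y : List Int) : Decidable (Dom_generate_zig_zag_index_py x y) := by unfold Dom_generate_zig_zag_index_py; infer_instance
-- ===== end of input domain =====

-- B replaces the per-cell slice sums of A by prefix-sum tables built once, filling each cell in O(1).

-- ===== PORT A =====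
def generate_zig_zag_index_py (x : List Int) (y : List Int) : List (List Int) :=
  let list_x := PySem.List.insert x 0 0
  let list_y := PySem.List.insert y 0 0
  (PySem.List.pyRange 1 (list_y.length : Int) 1).foldl (fun acc i =>
    (PySem.List.pyRange 1 (list_x.length : Int) 1).foldl (fun acc k =>
      acc ++ [[(PySem.List.slice list_x none (some k)).sum,
               (PySem.List.slice list_x none (some (k + 1))).sum,
               (PySem.List.slice list_y none (some i)).sum,
               (PySem.List.slice list_y none (some (i + 1))).sum]]) acc) []

-- ===== PORT B =====
-- px = [0]; for v in x: px.append(px[-1] + v)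
def pvPrefix (l : List Int) : List Int :=
  l.foldl (fun acc v => acc ++ [PySem.List.pyGetD acc (-1) 0 + v]) [0]

def generate_zig_zag_index_py_alt (x : List Int) (y : List Int) : List (List Int) :=
  let px := pvPrefix x
  let py := pvPrefix y
  (PySem.List.pyRange 0 (y.length : Int) 1).flatMap (fun i =>
    (PySem.List.pyRange 0 (x.length : Int) 1).map (fun k =>
      [PySem.List.pyGetD px k 0, PySem.List.pyGetD px (k + 1) 0,
       PySem.List.pyGetD py i 0, PySem.List.pyGetD py (i + 1) 0]))

-- ===== PRECONDITION & SPEC =====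
def Spec_generate_zig_zag_index_py (x : List Int) (y : List Int) (out : List (List Int)) : Prop := out = generate_zig_zag_index_py_alt x y
instance (x : List Int) (y : List Int) (out : List (List Int)) : Decidable (Spec_generate_zig_zag_index_py x y out) := by unfold Spec_generate_zig_zag_index_py; infer_instance

-- ===== CLAIM (what is proved, stated in full; the proofs are below) =====
def Claim_equal_generate_zig_zag_index_py : Prop := ∀ (x : List Int) (y : List Int), Dom_generate_zig_zag_index_py x y → Spec_generate_zig_zag_index_py x y (generate_zig_zag_index_py x y)

-- ===== LEMMAS AND PROOFS =====

-- running-sums list starting at s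
def pvSums (s : Int) : List Int → List Int
  | [] => [s]
  | v :: t => s :: pvSums (s + v) t

lemma pvPrefix_foldl (l : List Int) : ∀ (a : List Int) (s : Int),
    l.foldl (fun acc v => acc ++ [PySem.List.pyGetD acc (-1) 0 + v]) (a ++ [s]) = a ++ pvSums s l := by
  induction l with
  | nil => intro a s; simp [pvSums]
  | cons v t ih =>
    intro a s
    simp only [List.foldl_cons, PySem.List.pyGetD_neg_one_append_singleton, pvSums]
    have := ih (a ++ [s]) (s + v)
    simpa using this

lemma pvPrefix_eq (l : List Int) : pvPrefix l = pvSums 0 l := by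
  have := pvPrefix_foldl l [] 0
  simpa [pvPrefix] using this

lemma pvSums_getD (l : List Int) : ∀ (s : Int) (j : Nat), j ≤ l.length →
    (pvSums s l).getD j 0 = s + (l.take j).sum := by
  induction l with
  | nil =>
    intro s j hj
    have h0 : j = 0 := Nat.le_zero.mp hj
    subst h0; simp [pvSums]
  | cons v t ih =>
    intro s j hj
    cases j with
    | zero => simp [pvSums]
    | succ j =>
      simp only [pvSums, List.getD_cons_succ, List.take_succ_cons, List.sum_cons]
      rw [ih (s + v) j (by simpa using hj)]
      ring

lemma pvPrefix_getD (l : List Int) (j : Nat) (hj : j ≤ l.length) :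
    PySem.List.pyGetD (pvPrefix l) (j : Int) 0 = (l.take j).sum := by
  rw [PySem.List.pyGetD_natCast, pvPrefix_eq, pvSums_getD l 0 j hj]
  simp

-- the common canonical form
def pvCanon (x y : List Int) : List (List Int) :=
  (List.range y.length).flatMap (fun i =>
    (List.range x.length).map (fun k =>
      [(x.take k).sum, (x.take (k + 1)).sum, (y.take i).sum, (y.take (i + 1)).sum]))

lemma alt_eq_canon (x y : List Int) : generate_zig_zag_index_py_alt x y = pvCanon x y := by
  unfold generate_zig_zag_index_py_alt pvCanon
  rw [PySem.List.pyRange_one 0 (y.length : Int), PySem.List.pyRange_one 0 (x.length : Int)]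
  simp only [sub_zero, Int.toNat_natCast, List.flatMap_map, List.map_map]
  refine List.flatMap_congr ?_
  intro i hi
  simp only [List.mem_range] at hi
  refine List.map_congr_left ?_
  intro k hk
  simp only [List.mem_range] at hk
  simp only [Function.comp_apply, zero_add]
  rw [pvPrefix_getD x k (by omega), pvPrefix_getD y i (by omega)]
  have h1 : ((k : Int) + 1) = ((k + 1 : Nat) : Int) := by push_cast; ring
  have h2 : ((i : Int) + 1) = ((i + 1 : Nat) : Int) := by push_cast; ring
  rw [h1, h2, pvPrefix_getD x (k + 1) (by omega), pvPrefix_getD y (i + 1) (by omega)]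

lemma a_eq_canon (x y : List Int) : generate_zig_zag_index_py x y = pvCanon x y := by
  have hx : PySem.List.insert x 0 0 = 0 :: x := by
    simp [PySem.List.insert, PySem.List.sliceIndices]
  have hy : PySem.List.insert y 0 0 = 0 :: y := by
    simp [PySem.List.insert, PySem.List.sliceIndices]
  have hsum : ∀ (l : List Int) (k : Nat),
      (PySem.List.slice (0 :: l) none (some ((1 : Int) + k))).sum = (l.take k).sum := by
    intro l k
    have e : (1 : Int) + k = ((k + 1 : Nat) : Int) := by push_cast; ring
    rw [e, PySem.List.slice_to_natCast]
    simp
  have hsum' : ∀ (l : List Int) (k : Nat),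
      (PySem.List.slice (0 :: l) none (some ((1 : Int) + k + 1))).sum = (l.take (k + 1)).sum := by
    intro l k
    have e : (1 : Int) + k + 1 = ((k + 2 : Nat) : Int) := by push_cast; ring
    rw [e, PySem.List.slice_to_natCast]
    simp
  unfold generate_zig_zag_index_py
  simp only [hx, hy]
  rw [show (fun (acc : List (List Int)) (i : Int) =>
        (PySem.List.pyRange 1 ((0 :: x).length : Int) 1).foldl (fun acc k =>
          acc ++ [[(PySem.List.slice (0 :: x) none (some k)).sum,
                   (PySem.List.slice (0 :: x) none (some (k + 1))).sum,
                   (PySem.List.slice (0 :: y) none (some i)).sum,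
                   (PySem.List.slice (0 :: y) none (some (i + 1))).sum]]) acc)
      = (fun acc i => acc ++ (PySem.List.pyRange 1 ((0 :: x).length : Int) 1).map (fun k =>
          [(PySem.List.slice (0 :: x) none (some k)).sum,
           (PySem.List.slice (0 :: x) none (some (k + 1))).sum,
           (PySem.List.slice (0 :: y) none (some i)).sum,
           (PySem.List.slice (0 :: y) none (some (i + 1))).sum]))
    from funext fun acc => funext fun i => PySem.List.foldl_append_singleton_eq_map ..]
  rw [PySem.List.foldl_append_eq_flatMap, List.nil_append]
  have hbx : (((0 :: x).length : Int)) = (x.length : Int) + 1 := by simp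
  have hby : (((0 :: y).length : Int)) = (y.length : Int) + 1 := by simp
  rw [hbx, hby, PySem.List.pyRange_one, PySem.List.pyRange_one]
  have htx : ((x.length : Int) + 1 - 1).toNat = x.length := by omega
  have hty : ((y.length : Int) + 1 - 1).toNat = y.length := by omega
  rw [htx, hty, List.flatMap_map]
  unfold pvCanon
  refine List.flatMap_congr ?_
  intro i hi
  rw [List.map_map]
  refine List.map_congr_left ?_
  intro k hk
  simp only [Function.comp_apply]
  rw [hsum x k, hsum' x k, hsum y i, hsum' y i]

-- ===== VERDICT (by name: the statement is the Claim_ definition above) =====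
theorem generate_zig_zag_index_py_spec : Claim_equal_generate_zig_zag_index_py := by
  intro x y _
  unfold Spec_generate_zig_zag_index_py
  rw [a_eq_canon, alt_eq_canon]
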